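-- pv_equiv track=rewrite | github.com/Imadooka/KittenSync12-2-2026 | index/views.py | compare_with_inventory
-- ===== SOURCE A (Python) =====
-- def th_lower(s): return (s or "").strip().lower()
--
-- def compare_with_inventory(all_ingredients, inventory_names):
--     inv_norm = [th_lower(x) for x in inventory_names]
--     have, missing = [], []
--     for raw in all_ingredients:
--         item = th_lower(raw)
--         hit = any(item == x or item in x or x in item for x in inv_norm)
--         (have if hit else missing).append(raw)
--     # dedup
--     def dedup_keep_order(arr):
--         seen = set(); out = []
--         for x in arr:
--             if x not in seen:
--                 seen.add(x); out.append(x)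
--         return out
--     return dedup_keep_order(have), dedup_keep_order(missing)
-- ===== SOURCE B (Python) =====
-- def th_lower(s): return (s or "").strip().lower()
--
-- def compare_with_inventory(all_ingredients, inventory_names):
--     inv_norm = [th_lower(x) for x in inventory_names]
--     have, missing = [], []
--     items = list(all_ingredients)
--     while items:
--         raw = items[0]
--         items = [y for y in items[1:] if y != raw]
--         item = th_lower(raw)
--         if any(item == x or item in x or x in item for x in inv_norm):
--             have.append(raw)
--         else:
--             missing.append(raw)
--     return have, missing
-- ===== Notes on version B (the rewrite author's own statement) =====
-- stated objective: alternative
-- what changed: Replaces A's classify-into-two-lists pass plus two seen-set dedup passes with a worklist algorithm: a while loop repeatedly takes the head of a shrinking worklist, filters all its later duplicates out of the worklist (so no seen set and no dedup pass exists), and appends it directly to have or missing.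
import Mathlib
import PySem

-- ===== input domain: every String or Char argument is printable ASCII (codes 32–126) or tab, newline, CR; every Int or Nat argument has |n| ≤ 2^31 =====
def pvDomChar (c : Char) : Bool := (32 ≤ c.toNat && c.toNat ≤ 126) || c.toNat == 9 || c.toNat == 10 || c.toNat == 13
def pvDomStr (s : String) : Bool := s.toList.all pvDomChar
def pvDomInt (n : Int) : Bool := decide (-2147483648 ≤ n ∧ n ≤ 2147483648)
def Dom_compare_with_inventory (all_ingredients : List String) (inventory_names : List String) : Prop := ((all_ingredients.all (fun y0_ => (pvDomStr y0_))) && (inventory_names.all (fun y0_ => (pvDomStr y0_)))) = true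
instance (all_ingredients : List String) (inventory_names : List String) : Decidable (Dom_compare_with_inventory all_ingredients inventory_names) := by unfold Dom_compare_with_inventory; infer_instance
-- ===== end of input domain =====

-- B replaces A's classify pass plus two seen-set dedup passes by a worklist loop that filters
-- each head's later duplicates out of the remaining work list (alternative decomposition, no speed claim).


-- ===== PORT A =====
-- th_lower(s): (s or "").strip().lower()  ('s or ""' on a string is s itself when nonempty, "" when empty)
def th_lower (s : String) : String :=
  PySem.Str.lower (PySem.Str.strip (if s = "" then "" else s))

-- dedup_keep_order: seen = set(); out = []; for x in arr: if x not in seen: seen.add(x); out.append(x)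
def dedup_keep_order (arr : List String) : List String :=
  (arr.foldl
    (fun (p : PySem.Set String × List String) x =>
      if PySem.Set.contains p.1 x then p else (PySem.Set.add p.1 x, p.2 ++ [x]))
    (PySem.Set.empty, [])).2

def compare_with_inventory (all_ingredients : List String) (inventory_names : List String) : List String × List String :=
  let inv_norm := inventory_names.map (fun x => th_lower x)
  let hm := all_ingredients.foldl
    (fun (p : List String × List String) raw =>
      let item := th_lower raw
      let hit := inv_norm.any (fun x => item == x || PySem.Str.isIn item x || PySem.Str.isIn x item)
      if hit then (p.1 ++ [raw], p.2) else (p.1, p.2 ++ [raw]))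
    ([], [])
  (dedup_keep_order hm.1, dedup_keep_order hm.2)

-- ===== PORT B =====
-- the while loop of Source B: take the head of the work list, drop its later duplicates, classify it
def cwiLoop (inv_norm : List String) (items have_ missing : List String) : List String × List String :=
  match items with
  | [] => (have_, missing)
  | raw :: rest =>
    let items' := rest.filter (fun y => y != raw)
    let item := th_lower raw
    if inv_norm.any (fun x => item == x || PySem.Str.isIn item x || PySem.Str.isIn x item)
    then cwiLoop inv_norm items' (have_ ++ [raw]) missing
    else cwiLoop inv_norm items' have_ (missing ++ [raw])
termination_by items.length
decreasing_by all_goals (simp; try exact List.length_filter_le _ _)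

def compare_with_inventory_alt (all_ingredients : List String) (inventory_names : List String) : List String × List String :=
  let inv_norm := inventory_names.map (fun x => th_lower x)
  cwiLoop inv_norm all_ingredients [] []

-- ===== PRECONDITION & SPEC =====
def Spec_compare_with_inventory (all_ingredients : List String) (inventory_names : List String) (out : List String × List String) : Prop := out = compare_with_inventory_alt all_ingredients inventory_names
instance (all_ingredients : List String) (inventory_names : List String) (out : List String × List String) : Decidable (Spec_compare_with_inventory all_ingredients inventory_names out) := by unfold Spec_compare_with_inventory; infer_instance

-- ===== CLAIM (what is proved, stated in full; the proofs are below) =====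
def Claim_equal_compare_with_inventory : Prop := ∀ (all_ingredients : List String) (inventory_names : List String), Dom_compare_with_inventory all_ingredients inventory_names → Spec_compare_with_inventory all_ingredients inventory_names (compare_with_inventory all_ingredients inventory_names)

-- ===== LEMMAS AND PROOFS =====

-- A's hit predicate, named for use in the proofs
def hitF (inv_norm : List String) (raw : String) : Bool :=
  let item := th_lower raw
  inv_norm.any (fun x => item == x || PySem.Str.isIn item x || PySem.Str.isIn x item)

-- proof-side recursive form of ordered dedup relative to a seen list
def dedRel (seen : List String) : List String → List String
  | [] => []
  | x :: xs => if x ∈ seen then dedRel seen xs else x :: dedRel (seen ++ [x]) xs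

-- canonical worklist dedup (first occurrences, in order)
def wdedup (l : List String) : List String :=
  match l with
  | [] => []
  | x :: xs => x :: wdedup (xs.filter (fun y => y != x))
termination_by l.length
decreasing_by simp; exact List.length_filter_le _ _

-- dedRel depends on seen only through membership
theorem dedRel_congr (l : List String) (s t : List String) (hst : ∀ a, a ∈ s ↔ a ∈ t) :
    dedRel s l = dedRel t l := by
  induction l generalizing s t with
  | nil => rfl
  | cons x xs ih =>
    by_cases hx : x ∈ t
    · simp [dedRel, hx, (hst x).2 hx, ih s t hst]
    · have hxs : x ∉ s := fun hh => hx ((hst x).1 hh)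
      simp only [dedRel, hxs, hx, if_false]
      rw [ih (s ++ [x]) (t ++ [x]) (fun a => by simp [hst a])]

-- pushing x into the seen list = filtering x out of the input
theorem dedRel_seen_push (l : List String) (s : List String) (x : String) :
    dedRel (s ++ [x]) l = dedRel s (l.filter (fun y => y != x)) := by
  induction l generalizing s with
  | nil => rfl
  | cons y ys ih =>
    by_cases hyx : y = x
    · subst hyx
      simp only [List.filter_cons, bne_self_eq_false, dedRel, if_pos (by simp : y ∈ s ++ [y])]
      exact ih s
    · by_cases hy : y ∈ s
      · simp [bne_iff_ne, hyx, dedRel, hy, ih s]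
      · have hns : y ∉ s ++ [x] := by simp [hy, hyx]
        rw [List.filter_cons, if_pos (by simp [bne_iff_ne, hyx])]
        simp only [dedRel, hns, hy, if_false]
        rw [dedRel_congr ys (s ++ [x] ++ [y]) (s ++ [y] ++ [x]) (fun a => by simp; tauto), ih (s ++ [y])]

-- dedup commutes with filter
theorem dedRel_filter_comm (l : List String) (s : List String) (p : String → Bool) :
    dedRel s (l.filter p) = (dedRel s l).filter p := by
  match l with
  | [] => rfl
  | x :: xs =>
    by_cases hs : x ∈ s
    · by_cases hp : p x = true <;>
        simp [hp, dedRel, hs, dedRel_filter_comm xs s p]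
    · by_cases hp : p x = true
      · simp [hp, dedRel, hs, dedRel_filter_comm xs (s ++ [x]) p]
      · have hdd : (xs.filter (fun y => y != x)).filter p = xs.filter p := by
          rw [List.filter_filter]
          refine List.filter_congr (fun y _ => ?_)
          cases hpy : p y with
          | false => simp
          | true =>
            have : y ≠ x := fun h => by rw [h] at hpy; exact absurd hpy (by simp [hp])
            simp [bne_iff_ne, this]
        simp only [List.filter_cons, hp, Bool.false_eq_true, if_false, dedRel, hs]
        rw [dedRel_seen_push xs s x, ← dedRel_filter_comm (xs.filter (fun y => y != x)) s p, hdd]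
termination_by l.length
decreasing_by all_goals (simp; try exact List.length_filter_le _ _)

-- dedRel from an empty seen list is the worklist dedup
theorem dedRel_eq_wdedup (l : List String) : dedRel [] l = wdedup l := by
  match l with
  | [] => simp [dedRel, wdedup]
  | x :: xs =>
    simp only [dedRel, List.not_mem_nil, if_false, wdedup]
    rw [show ([] ++ [x] : List String) = [] ++ [x] from rfl,
        dedRel_seen_push xs [] x, dedRel_eq_wdedup (xs.filter (fun y => y != x))]
termination_by l.length
decreasing_by simp; exact List.length_filter_le _ _

-- A's classification loop is a pair of filters
theorem classify_foldl (f : String → Bool) (l : List String) (h m : List String) :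
    l.foldl (fun (p : List String × List String) raw =>
      if f raw then (p.1 ++ [raw], p.2) else (p.1, p.2 ++ [raw])) (h, m)
    = (h ++ l.filter f, m ++ l.filter (fun x => !f x)) := by
  induction l generalizing h m with
  | nil => simp
  | cons x xs ih =>
    simp only [List.foldl_cons, List.filter_cons]
    by_cases hx : f x = true <;> simp [hx, ih]

-- A's dedup loop computes dedRel
theorem dedup_foldl (l : List String) (seen : PySem.Set String) (out : List String) :
    (l.foldl (fun (p : PySem.Set String × List String) x =>
        if PySem.Set.contains p.1 x then p else (PySem.Set.add p.1 x, p.2 ++ [x]))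
      (seen, out)).2 = out ++ dedRel seen l := by
  induction l generalizing seen out with
  | nil => simp [dedRel]
  | cons x xs ih =>
    simp only [List.foldl_cons]
    by_cases hx : x ∈ seen
    · rw [show (if PySem.Set.contains seen x = true then (seen, out)
          else (PySem.Set.add seen x, out ++ [x])) = (seen, out) by simp [hx]]
      rw [ih]; simp [dedRel, hx]
    · rw [show (if PySem.Set.contains seen x = true then (seen, out)
          else (PySem.Set.add seen x, out ++ [x])) = (seen ++ [x], out ++ [x]) by
        simp [PySem.Set.add, hx]]
      rw [ih]; simp [dedRel, hx]

-- B's worklist loop = filters of the worklist dedup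
theorem cwiLoop_eq (inv : List String) (l h m : List String) :
    cwiLoop inv l h m = (h ++ (wdedup l).filter (hitF inv),
                         m ++ (wdedup l).filter (fun x => !hitF inv x)) := by
  match l with
  | [] => simp [cwiLoop, wdedup]
  | x :: xs =>
    rw [cwiLoop, wdedup]
    by_cases hx : hitF inv x = true
    · rw [if_pos (by exact hx), cwiLoop_eq inv (xs.filter (fun y => y != x))]
      simp [hx]
    · rw [if_neg (by exact hx), cwiLoop_eq inv (xs.filter (fun y => y != x))]
      simp [hx]
termination_by l.length
decreasing_by all_goals (simp; try exact List.length_filter_le _ _)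

-- ===== VERDICT (by name: the statement is the Claim_ definition above) =====
theorem compare_with_inventory_spec : Claim_equal_compare_with_inventory := by
  intro all_ingredients inventory_names _
  unfold Spec_compare_with_inventory compare_with_inventory compare_with_inventory_alt
  show (dedup_keep_order ((all_ingredients.foldl
          (fun (p : List String × List String) raw =>
            if hitF (inventory_names.map (fun x => th_lower x)) raw then (p.1 ++ [raw], p.2)
            else (p.1, p.2 ++ [raw])) ([], [])).1),
        dedup_keep_order ((all_ingredients.foldl
          (fun (p : List String × List String) raw =>
            if hitF (inventory_names.map (fun x => th_lower x)) raw then (p.1 ++ [raw], p.2)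
            else (p.1, p.2 ++ [raw])) ([], [])).2))
      = cwiLoop (inventory_names.map (fun x => th_lower x)) all_ingredients [] []
  rw [classify_foldl (hitF (inventory_names.map (fun x => th_lower x)))]
  unfold dedup_keep_order
  rw [dedup_foldl, dedup_foldl, cwiLoop_eq]
  simp [PySem.Set.empty, dedRel_filter_comm, dedRel_eq_wdedup]
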